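-- pv_equiv track=rewrite | github.com/EmmettPeng/RosalindProblems | LONG-Genome Assembly as Shortest Superstring.py | concatenate_overlap
-- ===== SOURCE A (Python) =====
-- def concatenate_overlap(str1, str2):
-- 	less = min(len(str1), len(str2))
-- 	for i in range(less, int(less/2), -1):
-- 		if str1[-i:] == str2[:i]: #suffix of str1 == prefix of str2 (max overlap)
-- 			return str1 + str2[i:]
-- 			break
-- 		elif str2[-i:] == str1[:i]:
-- 			return str2 + str1[i:]
-- 			break
-- ===== SOURCE B (Python) =====
-- def concatenate_overlap(str1, str2):
--     # For each ordered pair compute the single maximal suffix/prefix overlap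
--     # length with an upward scan keeping the last match, then pick the result
--     # arithmetically instead of scanning downward with early returns.
--     less = min(len(str1), len(str2))
--
--     def max_overlap(s, t):
--         best = 0
--         for k in range(1, less + 1):
--             if s[len(s) - k:] == t[:k]:
--                 best = k
--         return best
--
--     ov12 = max_overlap(str1, str2)
--     ov21 = max_overlap(str2, str1)
--     cut = less // 2
--     best = max(ov12, ov21)
--     if best > cut:
--         if ov12 == best:
--             return str1 + str2[best:]
--         else:
--             return str2 + str1[best:]
--     return None
-- ===== Notes on version B (the rewrite author's own statement) =====
-- stated objective: alternative
-- what changed: Instead of one downward scan over candidate overlap lengths with interleaved early returns, B computes the maximal overlap for each ordered pair by an upward fold keeping the last match and then selects the answer arithmetically (max, half-length cutoff, tie to str1-suffix).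
import Mathlib
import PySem

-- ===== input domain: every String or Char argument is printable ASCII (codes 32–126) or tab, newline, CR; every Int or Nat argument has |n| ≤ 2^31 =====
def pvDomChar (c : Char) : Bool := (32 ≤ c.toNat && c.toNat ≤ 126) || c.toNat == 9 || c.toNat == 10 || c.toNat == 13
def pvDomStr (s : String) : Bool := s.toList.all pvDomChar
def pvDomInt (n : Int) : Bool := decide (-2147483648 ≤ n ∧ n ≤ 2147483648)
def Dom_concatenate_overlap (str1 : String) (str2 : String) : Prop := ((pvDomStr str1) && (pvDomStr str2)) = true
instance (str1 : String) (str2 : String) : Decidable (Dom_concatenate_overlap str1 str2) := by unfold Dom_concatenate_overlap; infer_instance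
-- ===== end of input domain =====

-- B replaces A's single downward scan with interleaved early returns by two upward
-- last-match folds (one maximal overlap per ordered pair) and an arithmetic selection;
-- same cost, alternative structure.

-- ===== PORT A =====
-- A's 'for i in range(less, int(less/2), -1)' with its two early returns, as
-- structural recursion over the range list (strings handled on .toList via PySem.List).
def caLoop (s1 s2 : List Char) : List Int → Option String
  | [] => none
  | i :: rest =>
    if PySem.List.slice s1 (some (-i)) none == PySem.List.slice s2 none (some i) then
      some (String.ofList (s1 ++ PySem.List.slice s2 (some i) none))
    else if PySem.List.slice s2 (some (-i)) none == PySem.List.slice s1 none (some i) then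
      some (String.ofList (s2 ++ PySem.List.slice s1 (some i) none))
    else caLoop s1 s2 rest

def concatenate_overlap (str1 : String) (str2 : String) : Option String :=
  let less := min (PySem.Str.len str1) (PySem.Str.len str2)
  -- int(less/2) = less // 2 here since less ≥ 0
  caLoop str1.toList str2.toList (PySem.List.pyRange less (PySem.Int.floordiv less 2) (-1))

-- ===== PORT B =====
-- B's max_overlap: upward fold over k = 1..less keeping the last matching k.
def maxOverlap (less : Int) (s t : List Char) : Int :=
  (PySem.List.pyRange 1 (less + 1) 1).foldl
    (fun best k =>
      if PySem.List.slice s (some ((s.length : Int) - k)) none == PySem.List.slice t none (some k) then k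
      else best) 0

def concatenate_overlap_alt (str1 : String) (str2 : String) : Option String :=
  let s1 := str1.toList
  let s2 := str2.toList
  let less := min (PySem.Str.len str1) (PySem.Str.len str2)
  let ov12 := maxOverlap less s1 s2
  let ov21 := maxOverlap less s2 s1
  let cut := PySem.Int.floordiv less 2
  let best := max ov12 ov21
  if best > cut then
    if ov12 == best then some (String.ofList (s1 ++ PySem.List.slice s2 (some best) none))
    else some (String.ofList (s2 ++ PySem.List.slice s1 (some best) none))
  else none

-- ===== PRECONDITION & SPEC =====
def Spec_concatenate_overlap (str1 : String) (str2 : String) (out : Option String) : Prop := out = concatenate_overlap_alt str1 str2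
instance (str1 : String) (str2 : String) (out : Option String) : Decidable (Spec_concatenate_overlap str1 str2 out) := by unfold Spec_concatenate_overlap; infer_instance

-- ===== CLAIM (what is proved, stated in full; the proofs are below) =====
def Claim_equal_concatenate_overlap : Prop := ∀ (str1 : String) (str2 : String), Dom_concatenate_overlap str1 str2 → Spec_concatenate_overlap str1 str2 (concatenate_overlap str1 str2)

-- ===== LEMMAS AND PROOFS =====

-- the two suffix slices agree for 1 ≤ i ≤ |s|
theorem pv_slice_align (s : List Char) (i : Int) (h1 : 1 ≤ i) (h2 : i ≤ (s.length : Int)) :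
    PySem.List.slice s (some (-i)) none = PySem.List.slice s (some ((s.length : Int) - i)) none := by
  rw [PySem.List.slice_some_none, PySem.List.slice_some_none]
  have : PySem.List.clampIdx s.length (-i) = PySem.List.clampIdx s.length ((s.length : Int) - i) := by
    simp only [PySem.List.clampIdx]; split_ifs <;> omega
  rw [this]

-- A's loop is the first element of the range satisfying either condition
theorem caLoop_eq_find (s1 s2 : List Char) (l : List Int) :
    caLoop s1 s2 l =
      (l.find? (fun i =>
          (PySem.List.slice s1 (some (-i)) none == PySem.List.slice s2 none (some i)) ||
          (PySem.List.slice s2 (some (-i)) none == PySem.List.slice s1 none (some i)))).map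
        (fun i =>
          if PySem.List.slice s1 (some (-i)) none == PySem.List.slice s2 none (some i) then
            String.ofList (s1 ++ PySem.List.slice s2 (some i) none)
          else String.ofList (s2 ++ PySem.List.slice s1 (some i) none)) := by
  induction l with
  | nil => rfl
  | cons x t ih =>
    cases h1 : (PySem.List.slice s1 (some (-x)) none == PySem.List.slice s2 none (some x)) with
    | true =>
      simp only [caLoop, List.find?, h1]; simp
      intro hne; exact absurd (beq_iff_eq.mp h1) hne
    | false =>
      cases h2 : (PySem.List.slice s2 (some (-x)) none == PySem.List.slice s1 none (some x)) with
      | true =>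
        simp only [caLoop, List.find?, h1, h2]; simp
        intro he; exact absurd he (by simpa using h1)
      | false => simp only [caLoop, List.find?, h1, h2]; simpa using ih

-- an upward last-match fold is the first match of the reversed list
theorem foldl_last_match (p : Int → Bool) (l : List Int) (b : Int) :
    l.foldl (fun best k => if p k then k else best) b = (l.reverse.find? p).getD b := by
  induction l using List.reverseRecOn with
  | nil => rfl
  | append_singleton t x ih =>
    rw [List.foldl_append, List.reverse_append]
    by_cases h : p x = true <;> simp [List.find?, h, ih]

-- find? respects pointwise-equal predicates on the list's members
theorem find?_congr_mem {p q : Int → Bool} (l : List Int) (h : ∀ x ∈ l, p x = q x) :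
    l.find? p = l.find? q := by
  induction l with
  | nil => rfl
  | cons x t ih =>
    have hx := h x (List.mem_cons_self)
    by_cases hp : p x = true
    · simp [List.find?, hp, hx ▸ hp]
    · have hq : q x = false := by rw [← hx]; simpa using hp
      simp only [List.find?, hp, hq, Bool.false_eq_true, if_false]
      exact ih (fun y hy => h y (List.mem_cons_of_mem _ hy))

-- on a strictly decreasing list, find? returns the greatest satisfying element
theorem find?_of_max {l : List Int} {p : Int → Bool} {i : Int}
    (hl : l.Pairwise (· > ·)) (hi : i ∈ l) (hpi : p i = true)
    (hmax : ∀ j ∈ l, p j = true → j ≤ i) : l.find? p = some i := by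
  induction l with
  | nil => cases hi
  | cons x t ih =>
    rcases List.pairwise_cons.mp hl with ⟨hx, ht⟩
    rcases List.mem_cons.mp hi with rfl | hit
    · simp [List.find?, hpi]
    · have hxi : i < x := hx i hit
      have hpx : p x = false := by
        by_contra h
        have := hmax x List.mem_cons_self (by simpa using h)
        omega
      simp only [List.find?, hpx, Bool.false_eq_true, if_false]
      exact ih ht hit (fun j hj hpj => hmax j (List.mem_cons_of_mem _ hj) hpj)

-- and conversely, whatever it returns dominates every satisfying member
theorem find?_max {l : List Int} {p : Int → Bool} {i : Int}
    (hl : l.Pairwise (· > ·)) (h : l.find? p = some i) :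
    ∀ j ∈ l, p j = true → j ≤ i := by
  induction l with
  | nil => intro j hj; cases hj
  | cons x t ih =>
    rcases List.pairwise_cons.mp hl with ⟨hx, ht⟩
    intro j hj hpj
    by_cases hpx : p x = true
    · have : x = i := by simpa [List.find?, hpx] using h
      rcases List.mem_cons.mp hj with rfl | hjt
      · omega
      · have := hx j hjt; omega
    · simp only [List.find?, hpx, Bool.false_eq_true, if_false] at h
      rcases List.mem_cons.mp hj with rfl | hjt
      · simp [hpx] at hpj
      · exact ih ht h j hjt hpj


-- the heart: on a decreasing candidate range, "first i with p1 or p2, preferring p1 at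
-- the same i" equals "compare the two maxima, cut off at cut, tie to p1"
theorem pv_core {α : Type} (p1 p2 : Int → Bool) (u v : Int → α) (cut less : Int)
    (hc0 : 0 ≤ cut) (hcle : cut ≤ less) :
    ((PySem.List.pyRange less cut (-1)).find? (fun i => p1 i || p2 i)).map
        (fun i => if p1 i then u i else v i)
    = (if cut < max (((PySem.List.pyRange less 0 (-1)).find? p1).getD 0)
                    (((PySem.List.pyRange less 0 (-1)).find? p2).getD 0) then
         (if (((PySem.List.pyRange less 0 (-1)).find? p1).getD 0)
             == max (((PySem.List.pyRange less 0 (-1)).find? p1).getD 0)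
                    (((PySem.List.pyRange less 0 (-1)).find? p2).getD 0) then
            some (u (max (((PySem.List.pyRange less 0 (-1)).find? p1).getD 0)
                         (((PySem.List.pyRange less 0 (-1)).find? p2).getD 0)))
          else
            some (v (max (((PySem.List.pyRange less 0 (-1)).find? p1).getD 0)
                         (((PySem.List.pyRange less 0 (-1)).find? p2).getD 0))))
       else none) := by
  set F := PySem.List.pyRange less 0 (-1) with hF
  set D := PySem.List.pyRange less cut (-1) with hD
  have hFp : F.Pairwise (· > ·) := by
    rw [hF, PySem.List.pyRange_neg_one_eq_reverse]
    exact List.pairwise_reverse.mpr (PySem.List.pairwise_lt_pyRange_one _ _)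
  have hDp : D.Pairwise (· > ·) := by
    rw [hD, PySem.List.pyRange_neg_one_eq_reverse]
    exact List.pairwise_reverse.mpr (PySem.List.pairwise_lt_pyRange_one _ _)
  have hmemF : ∀ j, j ∈ F ↔ 0 < j ∧ j ≤ less := by
    intro j; rw [hF]; exact PySem.List.mem_pyRange_neg_one
  have hmemD : ∀ j, j ∈ D ↔ cut < j ∧ j ≤ less := by
    intro j; rw [hD]; exact PySem.List.mem_pyRange_neg_one
  cases hg : D.find? (fun i => p1 i || p2 i) with
  | none =>
    have hn := List.find?_eq_none.mp hg
    have h1 : (F.find? p1).getD 0 ≤ cut := by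
      cases h : F.find? p1 with
      | none => simpa using hc0
      | some j =>
        have hjF := (hmemF j).mp (List.mem_of_find?_eq_some h)
        have hpj := List.find?_some h
        by_contra hlt
        simp only [Option.getD_some, not_le] at hlt
        exact hn j ((hmemD j).mpr ⟨by omega, hjF.2⟩) (by simp [hpj])
    have h2 : (F.find? p2).getD 0 ≤ cut := by
      cases h : F.find? p2 with
      | none => simpa using hc0
      | some j =>
        have hjF := (hmemF j).mp (List.mem_of_find?_eq_some h)
        have hpj := List.find?_some h
        by_contra hlt
        simp only [Option.getD_some, not_le] at hlt
        exact hn j ((hmemD j).mpr ⟨by omega, hjF.2⟩) (by simp [hpj])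
    rw [if_neg (by simp only [not_lt]; exact max_le h1 h2)]
    simp
  | some i =>
    have hiD := (hmemD i).mp (List.mem_of_find?_eq_some hg)
    have hpi := List.find?_some hg
    have hmaxD := find?_max hDp hg
    have hiF : i ∈ F := (hmemF i).mpr ⟨by omega, hiD.2⟩
    have hmaxF1 : ∀ j ∈ F, p1 j = true → j ≤ i := by
      intro j hjF hpj
      have hj := (hmemF j).mp hjF
      by_cases hcj : cut < j
      · exact hmaxD j ((hmemD j).mpr ⟨hcj, hj.2⟩) (by simp [hpj])
      · omega
    have hmaxF2 : ∀ j ∈ F, p2 j = true → j ≤ i := by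
      intro j hjF hpj
      have hj := (hmemF j).mp hjF
      by_cases hcj : cut < j
      · exact hmaxD j ((hmemD j).mpr ⟨hcj, hj.2⟩) (by simp [hpj])
      · omega
    by_cases hp1 : p1 i = true
    · have hf1 : F.find? p1 = some i := find?_of_max hFp hiF hp1 hmaxF1
      have hov21 : (F.find? p2).getD 0 ≤ i := by
        cases h : F.find? p2 with
        | none => simp; omega
        | some j => simpa using hmaxF2 j (List.mem_of_find?_eq_some h) (List.find?_some h)
      have hbest : max ((F.find? p1).getD 0) ((F.find? p2).getD 0) = i := by
        rw [hf1]; exact max_eq_left (by simpa using hov21)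
      rw [hbest, if_pos hiD.1, hf1]
      simp [hp1]
    · have hp2 : p2 i = true := by
        have h1f : p1 i = false := by simpa using hp1
        simpa [h1f] using hpi
      have hf2 : F.find? p2 = some i := find?_of_max hFp hiF hp2 hmaxF2
      have hov12 : (F.find? p1).getD 0 < i := by
        cases h : F.find? p1 with
        | none => simp; omega
        | some j =>
          have hle := hmaxF1 j (List.mem_of_find?_eq_some h) (List.find?_some h)
          have hne : j ≠ i := by rintro rfl; exact hp1 (List.find?_some h)
          simp; omega
      have hbest : max ((F.find? p1).getD 0) ((F.find? p2).getD 0) = i := by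
        rw [hf2]; exact max_eq_right (by simpa using le_of_lt hov12)
      rw [hbest, if_pos hiD.1, if_neg (by simpa using ne_of_lt hov12)]
      simp [hp1]

theorem concatenate_overlap_main (str1 str2 : String) :
    concatenate_overlap str1 str2 = concatenate_overlap_alt str1 str2 := by
  unfold concatenate_overlap concatenate_overlap_alt
  simp only [PySem.Str.len_eq]
  set s1 := str1.toList with hs1
  set s2 := str2.toList with hs2
  set less : Int := min ((s1.length : Int)) ((s2.length : Int)) with hless
  set cut : Int := PySem.Int.floordiv less 2 with hcut
  have h0 : (0:Int) ≤ less := le_min (Int.natCast_nonneg _) (Int.natCast_nonneg _)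
  obtain ⟨hcf1, hcf2⟩ :=
    (PySem.Int.floordiv_eq_iff_of_pos (a := less) (b := 2) (by norm_num)).mp hcut.symm
  have hc0 : 0 ≤ cut := by omega
  have hcle : cut ≤ less := by omega
  have hle1 : less ≤ (s1.length : Int) := min_le_left _ _
  have hle2 : less ≤ (s2.length : Int) := min_le_right _ _
  have hrev : (PySem.List.pyRange 1 (less + 1) 1).reverse = PySem.List.pyRange less 0 (-1) := by
    have h := PySem.List.pyRange_neg_one_eq_reverse less 0
    norm_num at h
    exact h.symm
  have hov1 : maxOverlap less s1 s2
      = ((PySem.List.pyRange less 0 (-1)).find?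
          (fun k => PySem.List.slice s1 (some ((s1.length : Int) - k)) none ==
                    PySem.List.slice s2 none (some k))).getD 0 := by
    rw [maxOverlap, foldl_last_match, hrev]
  have hov2 : maxOverlap less s2 s1
      = ((PySem.List.pyRange less 0 (-1)).find?
          (fun k => PySem.List.slice s2 (some ((s2.length : Int) - k)) none ==
                    PySem.List.slice s1 none (some k))).getD 0 := by
    rw [maxOverlap, foldl_last_match, hrev]
  have hcong1 : (PySem.List.pyRange less 0 (-1)).find?
        (fun k => PySem.List.slice s1 (some ((s1.length : Int) - k)) none ==
                  PySem.List.slice s2 none (some k))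
      = (PySem.List.pyRange less 0 (-1)).find?
        (fun i => PySem.List.slice s1 (some (-i)) none == PySem.List.slice s2 none (some i)) :=
    find?_congr_mem _ (fun x hx => by
      have hm := PySem.List.mem_pyRange_neg_one.mp hx
      rw [← pv_slice_align s1 x (by omega) (by omega)])
  have hcong2 : (PySem.List.pyRange less 0 (-1)).find?
        (fun k => PySem.List.slice s2 (some ((s2.length : Int) - k)) none ==
                  PySem.List.slice s1 none (some k))
      = (PySem.List.pyRange less 0 (-1)).find?
        (fun i => PySem.List.slice s2 (some (-i)) none == PySem.List.slice s1 none (some i)) :=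
    find?_congr_mem _ (fun x hx => by
      have hm := PySem.List.mem_pyRange_neg_one.mp hx
      rw [← pv_slice_align s2 x (by omega) (by omega)])
  rw [caLoop_eq_find, hov1, hcong1, hov2, hcong2]
  exact pv_core
    (fun i => PySem.List.slice s1 (some (-i)) none == PySem.List.slice s2 none (some i))
    (fun i => PySem.List.slice s2 (some (-i)) none == PySem.List.slice s1 none (some i))
    (fun i => String.ofList (s1 ++ PySem.List.slice s2 (some i) none))
    (fun i => String.ofList (s2 ++ PySem.List.slice s1 (some i) none))
    cut less hc0 hcle

-- ===== VERDICT (by name: the statement is the Claim_ definition above) =====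
theorem concatenate_overlap_spec : Claim_equal_concatenate_overlap := by
  intro str1 str2 _
  unfold Spec_concatenate_overlap
  exact concatenate_overlap_main str1 str2
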